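-- pv_equiv track=rewrite | github.com/EliasAroni2000/automatas | Aroni-tp1-v2.py | tokenFalse
-- ===== SOURCE A (Python) =====
-- estado_final = "estado final"
--
-- estadoNoFinal = "estado no aceptado"
--
-- estadoTrampa = "estado trampa"
--
-- def tokenFalse(lexema):
--     estado = 0
--     estadoFinal = [5]
--     caracter = {0:{'f':1},1:{'a':2},2:{'l':3},3:{'s':4},4:{'e':5},
--                 5:{}}
--     for c in lexema:
--         if c in caracter[estado]:
--             estado = caracter[estado][c]
--         else:
--             estado = -1
--             break
--     if estado == -1:
--         return estadoTrampa
--     if estado in estadoFinal: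
--         return estado_final
--     else:
--         return estadoNoFinal
-- ===== SOURCE B (Python) =====
-- estado_final = "estado final"
--
-- estadoNoFinal = "estado no aceptado"
--
-- estadoTrampa = "estado trampa"
--
-- def tokenFalse(lexema):
--     if lexema == "false":
--         return estado_final
--     if "false".startswith(lexema):
--         return estadoNoFinal
--     return estadoTrampa
-- ===== Notes on version B (the rewrite author's own statement) =====
-- stated objective: idiomatic
-- what changed: Replaced the hand-built DFA transition table and state loop by a direct observation that the automaton accepts exactly the string 'false' and stays alive exactly on its proper prefixes, so B is an equality test plus a startswith prefix check.
import Mathlib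
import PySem

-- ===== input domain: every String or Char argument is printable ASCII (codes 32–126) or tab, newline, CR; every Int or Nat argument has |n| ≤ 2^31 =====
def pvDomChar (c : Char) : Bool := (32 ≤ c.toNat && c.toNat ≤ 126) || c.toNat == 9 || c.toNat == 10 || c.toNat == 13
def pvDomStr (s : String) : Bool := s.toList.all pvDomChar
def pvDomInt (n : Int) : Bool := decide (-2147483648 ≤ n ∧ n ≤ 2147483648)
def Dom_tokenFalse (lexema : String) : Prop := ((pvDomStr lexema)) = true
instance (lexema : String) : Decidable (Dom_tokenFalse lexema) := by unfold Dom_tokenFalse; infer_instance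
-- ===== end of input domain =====

-- B replaces A's DFA transition table and state loop by a direct equality + prefix check (idiomatic).

-- ===== PORT A =====
-- the literal transition table `caracter`
def caracterA : PySem.Dict Int (PySem.Dict Char Int) :=
  PySem.Dict.ofList
    [(0, PySem.Dict.ofList [('f', 1)]), (1, PySem.Dict.ofList [('a', 2)]),
     (2, PySem.Dict.ofList [('l', 3)]), (3, PySem.Dict.ofList [('s', 4)]),
     (4, PySem.Dict.ofList [('e', 5)]), (5, PySem.Dict.ofList [])]

-- the `for c in lexema` loop with its `break` (break = stop and return -1);
-- `caracter[estado]` always succeeds in A (estado is a table key before any break),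
-- so the getD default is never used
def tokenFalseLoop (estado : Int) (cs : List Char) : Int :=
  match cs with
  | [] => estado
  | c :: rest =>
    let inner := PySem.Dict.getD caracterA estado PySem.Dict.empty
    if inner.contains c then
      tokenFalseLoop ((inner.get? c).getD (-1)) rest
    else
      -1

def tokenFalse (lexema : String) : String :=
  let estado := tokenFalseLoop 0 lexema.toList
  if estado = -1 then "estado trampa"
  else if estado ∈ ([5] : List Int) then "estado final"
  else "estado no aceptado"

-- ===== PORT B =====
def tokenFalse_alt (lexema : String) : String :=
  if lexema == "false" then "estado final"
  else if PySem.Str.startswith "false" lexema then "estado no aceptado"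
  else "estado trampa"

-- ===== PRECONDITION & SPEC =====
def Spec_tokenFalse (lexema : String) (out : String) : Prop := out = tokenFalse_alt lexema
instance (lexema : String) (out : String) : Decidable (Spec_tokenFalse lexema out) := by unfold Spec_tokenFalse; infer_instance

-- ===== CLAIM (what is proved, stated in full; the proofs are below) =====
def Claim_equal_tokenFalse : Prop := ∀ (lexema : String), Dom_tokenFalse lexema → Spec_tokenFalse lexema (tokenFalse lexema)

-- ===== LEMMAS AND PROOFS =====

-- one iteration of A's loop from a state whose transition row is the single entry (ch, tgt)
theorem tokenFalseLoop_step (est : Int) (ch : Char) (tgt : Int) (c : Char) (rest : List Char)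
    (hget : PySem.Dict.getD caracterA est PySem.Dict.empty = PySem.Dict.mk [(ch, tgt)]) :
    tokenFalseLoop est (c :: rest) = if c = ch then tokenFalseLoop tgt rest else -1 := by
  simp only [tokenFalseLoop, hget]
  by_cases h : c = ch
  · subst h
    simp [PySem.Dict.get?_mk_cons]
  · have : (ch == c) = false := by simp [Ne.symm h]
    simp [PySem.Dict.contains_mk, this, h]

-- from state k (0 ≤ k ≤ 5), the loop ends in state k + |cs| if cs is a prefix of the
-- unread remainder of "false", and in the trap state -1 otherwise
theorem tokenFalseLoop_spec (cs : List Char) : ∀ (k : Nat), k ≤ 5 →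
    tokenFalseLoop (k : Int) cs =
      if cs <+: (List.drop k ['f', 'a', 'l', 's', 'e']) then ((k : Int) + cs.length) else -1 := by
  induction cs with
  | nil => intro k hk; simp [tokenFalseLoop]
  | cons c rest ih =>
    intro k hk
    interval_cases k
    · rw [show ((0 : Nat) : Int) = 0 from rfl,
        tokenFalseLoop_step 0 'f' 1 c rest (by decide)]
      by_cases h : c = 'f'
      · rw [if_pos h, show (1 : Int) = ((1 : Nat) : Int) from rfl, ih 1 (by norm_num)]
        subst h
        simp only [List.drop, List.cons_prefix_cons, true_and]
        split <;> first | rfl | (simp only [List.length_cons]; push_cast; omega)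
      · rw [if_neg h]
        have : ¬ (c :: rest <+: List.drop 0 ['f', 'a', 'l', 's', 'e']) := by
          simp [List.cons_prefix_cons, h]
        rw [if_neg this]
    · rw [show ((1 : Nat) : Int) = 1 from rfl,
        tokenFalseLoop_step 1 'a' 2 c rest (by decide)]
      by_cases h : c = 'a'
      · rw [if_pos h, show (2 : Int) = ((2 : Nat) : Int) from rfl, ih 2 (by norm_num)]
        subst h
        simp only [List.drop, List.cons_prefix_cons, true_and]
        split <;> first | rfl | (simp only [List.length_cons]; push_cast; omega)
      · rw [if_neg h]
        have : ¬ (c :: rest <+: List.drop 1 ['f', 'a', 'l', 's', 'e']) := by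
          simp [List.cons_prefix_cons, h]
        rw [if_neg this]
    · rw [show ((2 : Nat) : Int) = 2 from rfl,
        tokenFalseLoop_step 2 'l' 3 c rest (by decide)]
      by_cases h : c = 'l'
      · rw [if_pos h, show (3 : Int) = ((3 : Nat) : Int) from rfl, ih 3 (by norm_num)]
        subst h
        simp only [List.drop, List.cons_prefix_cons, true_and]
        split <;> first | rfl | (simp only [List.length_cons]; push_cast; omega)
      · rw [if_neg h]
        have : ¬ (c :: rest <+: List.drop 2 ['f', 'a', 'l', 's', 'e']) := by
          simp [List.cons_prefix_cons, h]
        rw [if_neg this]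
    · rw [show ((3 : Nat) : Int) = 3 from rfl,
        tokenFalseLoop_step 3 's' 4 c rest (by decide)]
      by_cases h : c = 's'
      · rw [if_pos h, show (4 : Int) = ((4 : Nat) : Int) from rfl, ih 4 (by norm_num)]
        subst h
        simp only [List.drop, List.cons_prefix_cons, true_and]
        split <;> first | rfl | (simp only [List.length_cons]; push_cast; omega)
      · rw [if_neg h]
        have : ¬ (c :: rest <+: List.drop 3 ['f', 'a', 'l', 's', 'e']) := by
          simp [List.cons_prefix_cons, h]
        rw [if_neg this]
    · rw [show ((4 : Nat) : Int) = 4 from rfl,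
        tokenFalseLoop_step 4 'e' 5 c rest (by decide)]
      by_cases h : c = 'e'
      · rw [if_pos h, show (5 : Int) = ((5 : Nat) : Int) from rfl, ih 5 (by norm_num)]
        subst h
        simp only [List.drop, List.cons_prefix_cons, true_and]
        split <;> first | rfl | (simp only [List.length_cons]; push_cast; omega)
      · rw [if_neg h]
        have : ¬ (c :: rest <+: List.drop 4 ['f', 'a', 'l', 's', 'e']) := by
          simp [List.cons_prefix_cons, h]
        rw [if_neg this]
    · -- state 5: empty transition row, any further character traps
      have hget : PySem.Dict.getD caracterA 5 PySem.Dict.empty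
          = PySem.Dict.mk ([] : List (Char × Int)) := by decide
      simp [tokenFalseLoop, hget]

-- ===== VERDICT (by name: the statement is the Claim_ definition above) =====
theorem tokenFalse_spec : Claim_equal_tokenFalse := by
  intro lexema _
  unfold Spec_tokenFalse
  rw [show tokenFalse lexema =
      (if tokenFalseLoop 0 lexema.toList = -1 then "estado trampa"
       else if tokenFalseLoop 0 lexema.toList ∈ ([5] : List Int) then "estado final"
       else "estado no aceptado") from rfl]
  rw [show tokenFalse_alt lexema =
      (if lexema == "false" then "estado final"
       else if PySem.Str.startswith "false" lexema then "estado no aceptado"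
       else "estado trampa") from rfl]
  have hloop := tokenFalseLoop_spec lexema.toList 0 (by norm_num)
  simp only [Nat.cast_zero, List.drop_zero, zero_add] at hloop
  rw [hloop]
  have hfl : "false".toList = ['f', 'a', 'l', 's', 'e'] := rfl
  have hsw : PySem.Str.startswith "false" lexema =
      PySem.Chars.startswith ['f', 'a', 'l', 's', 'e'] lexema.toList := by
    rw [← hfl]; simp [PySem.Str.startswith_eq]
  have hiff := PySem.Chars.startswith_iff "false".toList lexema.toList
  rw [hfl] at hiff
  have heqs : (lexema == "false") = (lexema.toList == ['f', 'a', 'l', 's', 'e']) := by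
    rw [← hfl]
    rcases lexema with ⟨l⟩
    simp [String.ext_iff]
  by_cases hpre : lexema.toList <+: (['f', 'a', 'l', 's', 'e'] : List Char)
  · rw [if_pos hpre]
    have hm1 : ((lexema.toList.length : Int) ≠ -1) := by omega
    rw [if_neg hm1]
    by_cases heq : lexema.toList = ['f', 'a', 'l', 's', 'e']
    · have hb : (lexema == "false") = true := by rw [heqs]; simp [heq]
      have hlen : lexema.toList.length = 5 := by rw [heq]; rfl
      rw [hb, hlen]
      simp
    · have hlt : lexema.toList.length < 5 := by
        have h1 := List.IsPrefix.length_le hpre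
        have h2 : lexema.toList.length ≠ 5 := fun hl =>
          heq (List.IsPrefix.eq_of_length hpre (by rw [hl]; rfl))
        simp only [List.length_cons, List.length_nil] at h1
        omega
      have hb : (lexema == "false") = false := by
        rw [heqs]; simp only [beq_eq_false_iff_ne, ne_eq]; exact heq
      have hnot5 : ¬ ((lexema.toList.length : Int) ∈ ([5] : List Int)) := by
        simp only [List.mem_singleton]
        omega
      have hsw3 : PySem.Str.startswith "false" lexema = true := by
        rw [hsw]; exact hiff.mpr hpre
      rw [if_neg hnot5, hb, hsw3]
      rfl
  · rw [if_neg hpre]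
    have hb : (lexema == "false") = false := by
      rw [heqs]; simp only [beq_eq_false_iff_ne, ne_eq]
      intro h; exact hpre (h ▸ List.prefix_refl _)
    have hsw2 : PySem.Str.startswith "false" lexema = false := by
      rw [hsw, Bool.eq_false_iff]; intro h; exact hpre (hiff.mp h)
    rw [if_pos rfl, hb, hsw2]
    rfl
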